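-- pv_equiv track=rewrite | github.com/RuiXing123/PDT_CWC_YOLO-DP | images_split.py | get_imgs_pos
-- ===== SOURCE A (Python) =====
-- def get_imgs_pos(img_w, img_h, cut_w, cut_h, w_stride, h_stride):
--     imgs_pos = []
--     for beg_w in range(0, img_w, w_stride):
--         for beg_h in range(0, img_h, h_stride):
--             x0, y0 = beg_w, beg_h  # 左上角的点
--             x1, y1 = beg_w + cut_w, beg_h + cut_h
--             if x1 > img_w:  # x轴上超出图像边界
--                 x1 = img_w
--                 x0 = img_w - cut_w
--             if y1 > img_h:  # y轴上超出图像边界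
--                 y1 = img_h
--                 y0 = img_h - cut_h
--             imgs_pos.append([x0, y0, x1, y1])
--             if y1 == img_h:  # 如果超出边界
--                 break
--     return imgs_pos
-- ===== SOURCE B (Python) =====
-- def get_imgs_pos(img_w, img_h, cut_w, cut_h, w_stride, h_stride):
--     xs = []
--     for beg_w in range(0, img_w, w_stride):
--         if beg_w + cut_w > img_w:
--             xs.append((img_w - cut_w, img_w))
--         else:
--             xs.append((beg_w, beg_w + cut_w))
--     ys = []
--     for beg_h in range(0, img_h, h_stride):
--         if beg_h + cut_h > img_h:
--             y0, y1 = img_h - cut_h, img_h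
--         else:
--             y0, y1 = beg_h, beg_h + cut_h
--         ys.append((y0, y1))
--         if y1 == img_h:
--             break
--     return [[x0, y0, x1, y1] for (x0, x1) in xs for (y0, y1) in ys]
-- ===== Notes on version B (the rewrite author's own statement) =====
-- stated objective: alternative
-- what changed: B precomputes the x-intervals and the break-terminated y-intervals in two independent single passes and emits the tiles as their cartesian product, instead of re-deriving the y clamps and break inside every outer iteration.
-- outside the precondition, e.g. on get_imgs_pos(4, 4, 2, 2, 0, 2): A raises ValueError, B raises ValueError; on get_imgs_pos(0, 4, -1, 6, 7, 0): A returns [], B raises ValueError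
import Mathlib
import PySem

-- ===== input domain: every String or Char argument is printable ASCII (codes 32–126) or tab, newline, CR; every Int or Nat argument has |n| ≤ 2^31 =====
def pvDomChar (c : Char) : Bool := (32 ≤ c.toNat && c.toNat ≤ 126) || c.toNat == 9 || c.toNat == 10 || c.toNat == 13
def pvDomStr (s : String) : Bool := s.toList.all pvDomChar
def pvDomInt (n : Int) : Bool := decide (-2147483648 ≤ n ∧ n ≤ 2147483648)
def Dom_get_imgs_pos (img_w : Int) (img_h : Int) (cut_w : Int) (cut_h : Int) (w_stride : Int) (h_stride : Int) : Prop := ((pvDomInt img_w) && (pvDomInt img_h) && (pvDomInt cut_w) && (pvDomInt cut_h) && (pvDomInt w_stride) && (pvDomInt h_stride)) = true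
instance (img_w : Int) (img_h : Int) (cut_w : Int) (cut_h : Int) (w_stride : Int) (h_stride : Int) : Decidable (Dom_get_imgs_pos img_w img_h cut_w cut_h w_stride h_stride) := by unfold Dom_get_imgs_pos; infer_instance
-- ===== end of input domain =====

-- B precomputes the x-intervals and break-terminated y-intervals once each and takes their
-- cartesian product, instead of recomputing the y clamps and break inside every outer column.

-- ===== PORT A =====
-- inner 'for beg_h in …' loop of A, with the break modelled by stopping the recursion
def getImgsPosInner (img_w : Int) (img_h : Int) (cut_w : Int) (cut_h : Int) (beg_w : Int) :
    List Int → List (List Int) → List (List Int)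
  | [], acc => acc
  | beg_h :: rest, acc =>
    let x0 := beg_w
    let y0 := beg_h
    let x1 := beg_w + cut_w
    let y1 := beg_h + cut_h
    let p := if x1 > img_w then (img_w - cut_w, img_w) else (x0, x1)
    let q := if y1 > img_h then (img_h - cut_h, img_h) else (y0, y1)
    let acc' := acc ++ [[p.1, q.1, p.2, q.2]]
    if q.2 = img_h then acc'
    else getImgsPosInner img_w img_h cut_w cut_h beg_w rest acc'

def get_imgs_pos (img_w : Int) (img_h : Int) (cut_w : Int) (cut_h : Int) (w_stride : Int) (h_stride : Int) : List (List Int) :=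
  (PySem.List.pyRange 0 img_w w_stride).foldl
    (fun acc beg_w =>
      getImgsPosInner img_w img_h cut_w cut_h beg_w (PySem.List.pyRange 0 img_h h_stride) acc)
    []

-- ===== PORT B =====
-- the y-interval pass of B, stopping after the row whose y1 hits img_h
def yTiles (img_h : Int) (cut_h : Int) : List Int → List (Int × Int)
  | [] => []
  | beg_h :: rest =>
    let q := if beg_h + cut_h > img_h then (img_h - cut_h, img_h) else (beg_h, beg_h + cut_h)
    if q.2 = img_h then [q] else q :: yTiles img_h cut_h rest

def get_imgs_pos_alt (img_w : Int) (img_h : Int) (cut_w : Int) (cut_h : Int) (w_stride : Int) (h_stride : Int) : List (List Int) :=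
  let xs := (PySem.List.pyRange 0 img_w w_stride).map
    (fun beg_w => if beg_w + cut_w > img_w then (img_w - cut_w, img_w) else (beg_w, beg_w + cut_w))
  let ys := yTiles img_h cut_h (PySem.List.pyRange 0 img_h h_stride)
  xs.flatMap (fun x => ys.map (fun y => [x.1, y.1, x.2, y.2]))

-- ===== PRECONDITION & SPEC =====
-- Pre_ excludes w_stride = 0 or h_stride = 0, on which Python's range raises ValueError (when the
-- outer range is empty A never builds the inner range and returns [] despite h_stride = 0; B builds
-- its y-list unconditionally and raises there, so those inputs are excluded too).
def Pre_get_imgs_pos (img_w : Int) (img_h : Int) (cut_w : Int) (cut_h : Int) (w_stride : Int) (h_stride : Int) : Prop :=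
  w_stride ≠ 0 ∧ h_stride ≠ 0
instance (img_w : Int) (img_h : Int) (cut_w : Int) (cut_h : Int) (w_stride : Int) (h_stride : Int) : Decidable (Pre_get_imgs_pos img_w img_h cut_w cut_h w_stride h_stride) := by unfold Pre_get_imgs_pos; infer_instance

def pvWitness_get_imgs_pos : Int × Int × Int × Int × Int × Int := (5, 5, 3, 3, 2, 2)

def Spec_get_imgs_pos (img_w : Int) (img_h : Int) (cut_w : Int) (cut_h : Int) (w_stride : Int) (h_stride : Int) (out : List (List Int)) : Prop := out = get_imgs_pos_alt img_w img_h cut_w cut_h w_stride h_stride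
instance (img_w : Int) (img_h : Int) (cut_w : Int) (cut_h : Int) (w_stride : Int) (h_stride : Int) (out : List (List Int)) : Decidable (Spec_get_imgs_pos img_w img_h cut_w cut_h w_stride h_stride out) := by unfold Spec_get_imgs_pos; infer_instance

-- ===== CLAIM (what is proved, stated in full; the proofs are below) =====
def Claim_equal_get_imgs_pos : Prop := ∀ (img_w : Int) (img_h : Int) (cut_w : Int) (cut_h : Int) (w_stride : Int) (h_stride : Int), Dom_get_imgs_pos img_w img_h cut_w cut_h w_stride h_stride → Pre_get_imgs_pos img_w img_h cut_w cut_h w_stride h_stride → Spec_get_imgs_pos img_w img_h cut_w cut_h w_stride h_stride (get_imgs_pos img_w img_h cut_w cut_h w_stride h_stride)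

-- ===== LEMMAS AND PROOFS =====
-- A's inner loop appends, for one fixed column, exactly the cartesian slice B builds for it
theorem getImgsPosInner_eq (img_w img_h cut_w cut_h beg_w : Int) (l : List Int)
    (acc : List (List Int)) :
    getImgsPosInner img_w img_h cut_w cut_h beg_w l acc
      = acc ++ (yTiles img_h cut_h l).map
          (fun y => [(if beg_w + cut_w > img_w then (img_w - cut_w, img_w) else (beg_w, beg_w + cut_w)).1,
                     y.1,
                     (if beg_w + cut_w > img_w then (img_w - cut_w, img_w) else (beg_w, beg_w + cut_w)).2,
                     y.2]) := by
  induction l generalizing acc with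
  | nil => simp [getImgsPosInner, yTiles]
  | cons beg_h rest ih =>
    simp only [getImgsPosInner, yTiles]
    split <;> split <;> (try rw [ih]) <;> simp

theorem get_imgs_pos_spec : Claim_equal_get_imgs_pos := by
  intro img_w img_h cut_w cut_h w_stride h_stride _ _
  show get_imgs_pos img_w img_h cut_w cut_h w_stride h_stride
      = get_imgs_pos_alt img_w img_h cut_w cut_h w_stride h_stride
  unfold get_imgs_pos get_imgs_pos_alt
  simp only [getImgsPosInner_eq, PySem.List.foldl_append_eq_flatMap, List.nil_append,
    List.flatMap_map]
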